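-- pv_equiv track=rewrite | github.com/RyanHuang781245/UO_MDR | modules/extract_word_chapter.py | _parse_number_parts
-- ===== SOURCE A (Python) =====
-- def _parse_number_parts(number_text: str) -> list[int]:
--     parts: list[int] = []
--     for token in (number_text or "").split("."):
--         token = token.strip()
--         if not token:
--             continue
--         if not token.isdigit():
--             return []
--         parts.append(int(token))
--     return parts
-- ===== SOURCE B (Python) =====
-- def _parse_number_parts(number_text: str) -> list[int]:
--     # Single character-level state machine over the text (plus a sentinel separator):
--     # it tokenizes, validates and collects digits itself, with no split/strip/isdigit.
--     parts: list[int] = []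
--     buf: list[str] = []     # digit characters of the current token
--     state = 0               # 0 = leading whitespace, 1 = in digits, 2 = trailing whitespace
--     for c in (number_text or "") + ".":
--         if c == ".":
--             if state != 0:
--                 parts.append(int("".join(buf)))
--             buf = []
--             state = 0
--         elif c.isspace():
--             if state == 1:
--                 state = 2
--         elif "0" <= c <= "9":
--             if state == 2:
--                 return []
--             buf.append(c)
--             state = 1
--         else:
--             return []
--     return parts
-- ===== Notes on version B (the rewrite author's own statement) =====
-- stated objective: alternative
-- what changed: Replaces A's split/strip/isdigit/int token pipeline by a single character-level state machine that tokenizes, validates and collects the digit characters itself in one pass over the string.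
import Mathlib
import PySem

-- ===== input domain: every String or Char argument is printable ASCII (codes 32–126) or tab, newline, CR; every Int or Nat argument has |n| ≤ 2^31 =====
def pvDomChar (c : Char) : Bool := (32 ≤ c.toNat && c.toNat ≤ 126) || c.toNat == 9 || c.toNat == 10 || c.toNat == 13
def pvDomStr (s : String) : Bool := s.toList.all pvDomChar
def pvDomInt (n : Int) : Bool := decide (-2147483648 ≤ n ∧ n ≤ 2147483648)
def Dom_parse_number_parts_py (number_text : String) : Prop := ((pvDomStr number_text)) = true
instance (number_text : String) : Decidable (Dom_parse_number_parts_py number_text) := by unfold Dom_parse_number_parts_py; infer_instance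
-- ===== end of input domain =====

-- B replaces A's split/strip/isdigit/int token pipeline with a single character-level
-- state machine that tokenizes, validates and collects digit characters itself (alternative, same cost).

-- ===== PORT A =====
-- the for-loop over the '.'-separated tokens, with early `return []`
def parse_number_parts_loop : List String → List Int → List Int
  | [], parts => parts
  | tok :: rest, parts =>
    let token := PySem.Str.strip tok
    if token = "" then parse_number_parts_loop rest parts
    else if PySem.Str.strIsdigit token = false then []  -- `if not token.isdigit()`
    else parse_number_parts_loop rest (parts ++ [(PySem.Int.ofStr? token).getD 0])
      -- int(token): on the ASCII domain token.isdigit() guarantees int() succeeds, so getD 0 is never the default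

def parse_number_parts_py (number_text : String) : List Int :=
  -- (number_text or "").split(".")
  parse_number_parts_loop
    ((PySem.Str.split? (if number_text = "" then "" else number_text) ".").getD []) []

-- ===== PORT B =====
-- the three scanner states of Source B (0 = leading ws, 1 = in digits, 2 = trailing ws)
inductive PState : Type
  | lead | num | trail
deriving DecidableEq, Repr

-- the for-loop of Source B: c ranges over the text plus the sentinel '.';
-- int("".join(buf)) on the collected digit chars is PySem.Int.ofChars? buf
def parse_number_parts_scan : List Char → List Int → List Char → PState → List Int
  | [], parts, _, _ => parts
  | c :: cs, parts, buf, st =>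
    if c = '.' then
      parse_number_parts_scan cs
        (if st ≠ PState.lead then parts ++ [(PySem.Int.ofChars? buf).getD 0] else parts)
        [] PState.lead
    else if PySem.Chars.isspace c then
      parse_number_parts_scan cs parts buf (if st = PState.num then PState.trail else st)
    else if '0' ≤ c ∧ c ≤ '9' then
      if st = PState.trail then []
      else parse_number_parts_scan cs parts (buf ++ [c]) PState.num
    else []

def parse_number_parts_py_alt (number_text : String) : List Int :=
  parse_number_parts_scan
    ((if number_text = "" then "" else number_text).toList ++ ['.']) [] [] PState.lead

-- ===== PRECONDITION & SPEC =====
def Spec_parse_number_parts_py (number_text : String) (out : List Int) : Prop := out = parse_number_parts_py_alt number_text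
instance (number_text : String) (out : List Int) : Decidable (Spec_parse_number_parts_py number_text out) := by unfold Spec_parse_number_parts_py; infer_instance

-- ===== CLAIM (what is proved, stated in full; the proofs are below) =====
def Claim_equal_parse_number_parts_py : Prop := ∀ (number_text : String), Dom_parse_number_parts_py number_text → Spec_parse_number_parts_py number_text (parse_number_parts_py number_text)

-- ===== LEMMAS AND PROOFS =====

-- `s or ""` is `s` for strings
theorem or_empty (s : String) : (if s = "" then "" else s) = s := by
  split_ifs with h
  · exact h.symm
  · rfl

-- reference split: tokens of `pre ++ l` split on '.', `pre` being the current partial token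
def mySplit : List Char → List Char → List (List Char)
  | pre, [] => [pre]
  | pre, c :: cs => if c = '.' then pre :: mySplit [] cs else mySplit (pre ++ [c]) cs

theorem go_spec (l : List Char) : ∀ (cur : List Char) (acc : List (List Char)) (fuel : Nat),
    l.length < fuel →
    PySem.Chars.splitOn.go ['.'] fuel l cur acc = acc.reverse ++ mySplit cur.reverse l := by
  induction l with
  | nil =>
    intro cur acc fuel h
    match fuel with
    | fuel + 1 => simp [PySem.Chars.splitOn.go, mySplit]
  | cons c cs ih =>
    intro cur acc fuel h
    match fuel with
    | fuel + 1 =>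
      by_cases hc : c = '.'
      · subst hc
        rw [show PySem.Chars.splitOn.go ['.'] (fuel + 1) ('.' :: cs) cur acc
              = PySem.Chars.splitOn.go ['.'] fuel cs [] (cur.reverse :: acc) by
            simp [PySem.Chars.splitOn.go, List.isPrefixOf]]
        rw [ih [] (cur.reverse :: acc) fuel (by simpa using h)]
        simp [mySplit]
      · rw [show PySem.Chars.splitOn.go ['.'] (fuel + 1) (c :: cs) cur acc
              = PySem.Chars.splitOn.go ['.'] fuel cs (c :: cur) acc by
            simp [PySem.Chars.splitOn.go, List.isPrefixOf, Ne.symm hc]]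
        rw [ih (c :: cur) acc fuel (by simpa using h)]
        simp [mySplit, hc]

theorem splitOn_eq (s : List Char) : PySem.Chars.splitOn s ['.'] = mySplit [] s := by
  have := go_spec s [] [] (s.length + 1) (by omega)
  simpa [PySem.Chars.splitOn] using this

def glue (ts : List (List Char)) : List Char := ts.flatMap (· ++ ['.'])

theorem mySplit_glue (s : List Char) : ∀ pre, glue (mySplit pre s) = pre ++ s ++ ['.'] := by
  induction s with
  | nil => intro pre; simp [mySplit, glue]
  | cons c cs ih =>
    intro pre
    by_cases hc : c = '.'
    · subst hc; simp [mySplit, glue] at ih ⊢; simp [ih []]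
    · simp [mySplit, hc, ih (pre ++ [c])]

theorem mySplit_dotfree (s : List Char) : ∀ pre, '.' ∉ pre → ∀ t ∈ mySplit pre s, '.' ∉ t := by
  induction s with
  | nil => intro pre hp t ht; simp [mySplit] at ht; subst ht; exact hp
  | cons c cs ih =>
    intro pre hp t ht
    by_cases hc : c = '.'
    · subst hc
      simp [mySplit] at ht
      rcases ht with h | h
      · subst h; exact hp
      · exact ih [] (by simp) t h
    · simp [mySplit, hc] at ht
      have hpc : '.' ∉ pre ++ [c] := by
        intro hm
        rcases List.mem_append.mp hm with hm | hm
        · exact hp hm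
        · simp at hm; exact hc hm.symm
      exact ih (pre ++ [c]) hpc t ht

-- per-token scanner: what parse_number_parts_scan does to (state, buf) on dot-free characters
def scanTok : PState → List Char → List Char → Option (PState × List Char)
  | st, buf, [] => some (st, buf)
  | st, buf, c :: cs =>
    if PySem.Chars.isspace c then scanTok (if st = PState.num then PState.trail else st) buf cs
    else if '0' ≤ c ∧ c ≤ '9' then
      if st = PState.trail then none else scanTok PState.num (buf ++ [c]) cs
    else none

theorem scan_append (t : List Char) : ∀ (rest : List Char) (parts : List Int) (buf : List Char) (st : PState),
    '.' ∉ t →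
    parse_number_parts_scan (t ++ rest) parts buf st =
      match scanTok st buf t with
      | none => []
      | some (st', buf') => parse_number_parts_scan rest parts buf' st' := by
  induction t with
  | nil => intro rest parts buf st _; simp [scanTok]
  | cons c cs ih =>
    intro rest parts buf st hd
    have hc : c ≠ '.' := by intro h; exact hd (by simp [h])
    have hcs : '.' ∉ cs := fun h => hd (by simp [h])
    cases hsp : PySem.Chars.isspace c with
    | true =>
      simp only [List.cons_append, parse_number_parts_scan, scanTok, if_neg hc, hsp, if_true]
      exact ih rest parts buf _ hcs
    | false =>
      by_cases hdig : '0' ≤ c ∧ c ≤ '9'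
      · by_cases htr : st = PState.trail
        · simp [parse_number_parts_scan, scanTok, hc, hsp, hdig, htr]
        · simp only [List.cons_append, parse_number_parts_scan, scanTok, if_neg hc, hsp,
            Bool.false_eq_true, if_false, if_pos hdig, if_neg htr]
          exact ih rest parts (buf ++ [c]) _ hcs
      · simp [parse_number_parts_scan, scanTok, hc, hsp, hdig]

-- character-class facts
theorem digit_not_space (c : Char) (h : '0' ≤ c ∧ c ≤ '9') : PySem.Chars.isspace c = false := by
  obtain ⟨h1, h2⟩ := h
  have h1' : 48 ≤ c.toNat := h1
  have h2' : c.toNat ≤ 57 := h2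
  simp only [PySem.Chars.isspace]
  simp only [Bool.or_eq_false_iff, Bool.and_eq_false_iff, decide_eq_false_iff_not]
  omega

theorem isdigit_iff (c : Char) : PySem.Chars.isdigit c = true ↔ ('0' ≤ c ∧ c ≤ '9') := by
  simp [PySem.Chars.isdigit]

-- rstrip facts
theorem rstrip_all_space (l : List Char) (h : l.all PySem.Chars.isspace) :
    PySem.Chars.rstrip l = [] := by
  simp only [PySem.Chars.rstrip, List.reverse_eq_nil_iff, List.dropWhile_eq_nil_iff]
  intro x hx
  exact (List.all_eq_true.mp h) x (List.mem_reverse.mp hx)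

theorem rstrip_cons_of_not_space (c : Char) (cs : List Char) (h : PySem.Chars.isspace c = false) :
    PySem.Chars.rstrip (c :: cs) = c :: PySem.Chars.rstrip cs := by
  simp only [PySem.Chars.rstrip, List.reverse_cons, List.dropWhile_append]
  split
  · rename_i hemp
    rw [List.isEmpty_iff] at hemp
    simp [List.dropWhile, h, hemp]
  · simp

theorem rstrip_cons_of_not_all (c : Char) (cs : List Char) (h : cs.all PySem.Chars.isspace = false) :
    PySem.Chars.rstrip (c :: cs) = c :: PySem.Chars.rstrip cs := by
  simp only [PySem.Chars.rstrip, List.reverse_cons, List.dropWhile_append]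
  split
  · rename_i hemp
    exfalso
    rw [List.isEmpty_iff, List.dropWhile_eq_nil_iff] at hemp
    rw [List.all_eq_false] at h
    obtain ⟨x, hx, hxs⟩ := h
    exact hxs (hemp x (List.mem_reverse.mpr hx))
  · simp

theorem scan_trail (cs : List Char) : ∀ buf,
    scanTok PState.trail buf cs =
      if cs.all PySem.Chars.isspace then some (PState.trail, buf) else none := by
  induction cs with
  | nil => intro buf; simp [scanTok]
  | cons c cs ih =>
    intro buf
    by_cases hsp : PySem.Chars.isspace c
    · simp [scanTok, hsp, ih buf]
    · by_cases hdig : '0' ≤ c ∧ c ≤ '9'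
      · simp [scanTok, hsp, hdig]
      · simp [scanTok, hsp, hdig]

theorem scan_num (cs : List Char) : ∀ buf,
    ((PySem.Chars.rstrip cs).all PySem.Chars.isdigit = true →
      ∃ st', st' ≠ PState.lead ∧
        scanTok PState.num buf cs = some (st', buf ++ PySem.Chars.rstrip cs)) ∧
    ((PySem.Chars.rstrip cs).all PySem.Chars.isdigit = false →
      scanTok PState.num buf cs = none) := by
  induction cs with
  | nil =>
    intro buf
    constructor
    · intro _; exact ⟨PState.num, by simp, by simp [scanTok, PySem.Chars.rstrip]⟩
    · intro h; simp [PySem.Chars.rstrip] at h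
  | cons c cs ih =>
    intro buf
    by_cases hsp : PySem.Chars.isspace c
    · by_cases hall : cs.all PySem.Chars.isspace
      · have hr : PySem.Chars.rstrip (c :: cs) = [] :=
          rstrip_all_space _ (by simp_all)
        constructor
        · intro _
          refine ⟨PState.trail, by simp, ?_⟩
          simp [scanTok, hsp, scan_trail, hall, hr]
        · intro h; simp [hr] at h
      · have hr := rstrip_cons_of_not_all c cs (by simpa using hall)
        have hcd : PySem.Chars.isdigit c = false := by
          rw [Bool.eq_false_iff]
          intro hd
          rw [isdigit_iff] at hd
          rw [digit_not_space c hd] at hsp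
          exact Bool.false_ne_true hsp
        constructor
        · intro h
          exfalso
          rw [hr] at h
          simp [hcd] at h
        · intro _
          simp [scanTok, hsp, scan_trail, hall]
    · by_cases hdig : '0' ≤ c ∧ c ≤ '9'
      · have hr := rstrip_cons_of_not_space c cs (by simpa using hsp)
        have hcd : PySem.Chars.isdigit c = true := (isdigit_iff c).mpr hdig
        constructor
        · intro h
          rw [hr] at h
          simp only [List.all_cons, hcd, Bool.true_and] at h
          obtain ⟨st', hne, heq⟩ := (ih (buf ++ [c])).1 h
          exact ⟨st', hne, by simp [scanTok, hsp, hdig, heq, hr]⟩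
        · intro h
          rw [hr] at h
          simp only [List.all_cons, hcd, Bool.true_and] at h
          simp [scanTok, hsp, hdig, (ih (buf ++ [c])).2 h]
      · have hr := rstrip_cons_of_not_space c cs (by simpa using hsp)
        have hcd : PySem.Chars.isdigit c = false := by
          rw [Bool.eq_false_iff]; intro hd; exact hdig ((isdigit_iff c).mp hd)
        constructor
        · intro h; rw [hr] at h; simp [hcd] at h
        · intro _; simp [scanTok, hsp, hdig]

theorem scan_lead_space (t : List Char) : ∀ buf,
    scanTok PState.lead buf t = scanTok PState.lead buf (List.dropWhile PySem.Chars.isspace t) := by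
  induction t with
  | nil => intro buf; simp
  | cons c cs ih =>
    intro buf
    by_cases hsp : PySem.Chars.isspace c
    · simp [scanTok, hsp, List.dropWhile, ih buf]
    · simp [List.dropWhile, hsp]

theorem head_dropWhile {p : Char → Bool} (t : List Char) (c : Char) (cs : List Char)
    (h : List.dropWhile p t = c :: cs) : p c = false := by
  induction t with
  | nil => simp at h
  | cons x xs ih =>
    by_cases hx : p x
    · rw [List.dropWhile_cons_of_pos hx] at h; exact ih h
    · rw [List.dropWhile_cons_of_neg hx] at h
      cases h
      simpa using hx

-- the trichotomy of scanTok from the initial state, phrased with A's strip/strIsdigit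
theorem tok_scan (t : List Char) :
    (PySem.Chars.strip t = [] → scanTok PState.lead [] t = some (PState.lead, []))
    ∧ (PySem.Chars.strip t ≠ [] → PySem.Chars.strIsdigit (PySem.Chars.strip t) = true →
        ∃ st', st' ≠ PState.lead ∧ scanTok PState.lead [] t = some (st', PySem.Chars.strip t))
    ∧ (PySem.Chars.strip t ≠ [] → PySem.Chars.strIsdigit (PySem.Chars.strip t) = false →
        scanTok PState.lead [] t = none) := by
  have hstrip : PySem.Chars.strip t = PySem.Chars.rstrip (List.dropWhile PySem.Chars.isspace t) := by
    simp [PySem.Chars.strip, PySem.Chars.lstrip]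
  rw [hstrip]
  rw [scan_lead_space t []]
  cases h : List.dropWhile PySem.Chars.isspace t with
  | nil =>
    refine ⟨fun _ => by simp [scanTok], fun hne _ => ?_, fun hne _ => ?_⟩ <;>
      · exfalso; exact hne (by simp [PySem.Chars.rstrip])
  | cons c cs =>
    have hc : PySem.Chars.isspace c = false := head_dropWhile t c cs h
    by_cases hdig : '0' ≤ c ∧ c ≤ '9'
    · have hr := rstrip_cons_of_not_space c cs hc
      have hcd : PySem.Chars.isdigit c = true := (isdigit_iff c).mpr hdig
      refine ⟨fun hnil => ?_, fun _ hdigs => ?_, fun _ hdigs => ?_⟩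
      · rw [hr] at hnil; simp at hnil
      · rw [hr] at hdigs
        have : (PySem.Chars.rstrip cs).all PySem.Chars.isdigit = true := by
          simpa [PySem.Chars.strIsdigit, hcd] using hdigs
        obtain ⟨st', hne, heq⟩ := (scan_num cs [c]).1 this
        refine ⟨st', hne, ?_⟩
        simp [scanTok, hc, hdig, heq, hr]
      · rw [hr] at hdigs
        have : (PySem.Chars.rstrip cs).all PySem.Chars.isdigit = false := by
          simpa [PySem.Chars.strIsdigit, hcd] using hdigs
        simp [scanTok, hc, hdig, (scan_num cs [c]).2 this]
    · have hr := rstrip_cons_of_not_space c cs hc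
      have hcd : PySem.Chars.isdigit c = false := by
        rw [Bool.eq_false_iff]; intro hd; exact hdig ((isdigit_iff c).mp hd)
      refine ⟨fun hnil => ?_, fun _ hdigs => ?_, fun _ hdigs => ?_⟩
      · rw [hr] at hnil; simp at hnil
      · exfalso; rw [hr] at hdigs; simp [PySem.Chars.strIsdigit, hcd] at hdigs
      · simp [scanTok, hc, hdig]

-- token-level reference loop (proof-only)
def AloopC : List (List Char) → List Int → List Int
  | [], parts => parts
  | t :: ts, parts =>
    let tok := PySem.Chars.strip t
    if tok = [] then AloopC ts parts
    else if PySem.Chars.strIsdigit tok = false then []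
    else AloopC ts (parts ++ [(PySem.Int.ofChars? tok).getD 0])

theorem scan_dot (cs : List Char) (parts : List Int) (buf : List Char) (st : PState) :
    parse_number_parts_scan ('.' :: cs) parts buf st =
      parse_number_parts_scan cs
        (if st ≠ PState.lead then parts ++ [(PySem.Int.ofChars? buf).getD 0] else parts)
        [] PState.lead := by
  simp [parse_number_parts_scan]

theorem scan_glue (ts : List (List Char)) : ∀ parts, (∀ t ∈ ts, '.' ∉ t) →
    parse_number_parts_scan (glue ts) parts [] PState.lead = AloopC ts parts := by
  induction ts with
  | nil => intro parts _; simp [glue, AloopC, parse_number_parts_scan]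
  | cons t ts ih =>
    intro parts hdf
    have hdt : '.' ∉ t := hdf t (by simp)
    have hglue : glue (t :: ts) = t ++ ('.' :: glue ts) := by simp [glue]
    rw [hglue, scan_append t ('.' :: glue ts) parts [] PState.lead hdt]
    obtain ⟨h1, h2, h3⟩ := tok_scan t
    by_cases hnil : PySem.Chars.strip t = []
    · rw [h1 hnil]
      show parse_number_parts_scan ('.' :: glue ts) parts [] PState.lead = AloopC (t :: ts) parts
      rw [scan_dot, if_neg (by simp)]
      rw [show AloopC (t :: ts) parts = AloopC ts parts from by simp [AloopC, hnil]]
      exact ih parts (fun u hu => hdf u (by simp [hu]))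
    · by_cases hdigs : PySem.Chars.strIsdigit (PySem.Chars.strip t) = true
      · obtain ⟨st', hne, heq⟩ := h2 hnil hdigs
        rw [heq]
        show parse_number_parts_scan ('.' :: glue ts) parts (PySem.Chars.strip t) st'
              = AloopC (t :: ts) parts
        rw [scan_dot, if_pos hne]
        rw [show AloopC (t :: ts) parts
              = AloopC ts (parts ++ [(PySem.Int.ofChars? (PySem.Chars.strip t)).getD 0]) from by
            simp [AloopC, hnil, hdigs]]
        exact ih _ (fun u hu => hdf u (by simp [hu]))
      · rw [h3 hnil (by simpa using hdigs)]
        simp [AloopC, hnil, hdigs]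

theorem Aloop_eq (ts : List (List Char)) : ∀ parts,
    parse_number_parts_loop (ts.map String.ofList) parts = AloopC ts parts := by
  induction ts with
  | nil => intro parts; simp [parse_number_parts_loop, AloopC]
  | cons t ts ih =>
    intro parts
    simp only [List.map_cons, parse_number_parts_loop, AloopC]
    have htl : (PySem.Str.strip (String.ofList t)) = String.ofList (PySem.Chars.strip t) := by
      simp [PySem.Str.strip, String.toList_ofList]
    have hemp : (PySem.Str.strip (String.ofList t) = "") ↔ (PySem.Chars.strip t = []) := by
      rw [htl]
      constructor
      · intro h
        have := congrArg String.toList h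
        simpa [String.toList_ofList] using this
      · intro h; rw [h]
    have hdig : PySem.Str.strIsdigit (PySem.Str.strip (String.ofList t))
        = PySem.Chars.strIsdigit (PySem.Chars.strip t) := by
      rw [htl]; simp [PySem.Str.strIsdigit, String.toList_ofList]
    have hint : PySem.Int.ofStr? (PySem.Str.strip (String.ofList t))
        = PySem.Int.ofChars? (PySem.Chars.strip t) := by
      rw [htl]; simp [PySem.Int.ofStr?, String.toList_ofList]
    by_cases h0 : PySem.Chars.strip t = []
    · rw [if_pos (hemp.mpr h0), if_pos h0]
      exact ih parts
    · rw [if_neg (fun h => h0 (hemp.mp h)), if_neg h0, hdig, hint]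
      by_cases h1 : PySem.Chars.strIsdigit (PySem.Chars.strip t) = true
      · rw [h1]
        simp only [Bool.true_eq_false, if_false]
        exact ih (parts ++ [(PySem.Int.ofChars? (PySem.Chars.strip t)).getD 0])
      · rw [Bool.not_eq_true] at h1
        simp [h1]

theorem split_bridge (s : String) :
    (PySem.Str.split? s ".").getD [] = (mySplit [] s.toList).map String.ofList := by
  have hdot : (".").toList = ['.'] := rfl
  simp [PySem.Str.split?, PySem.Chars.split?, hdot, splitOn_eq]

-- ===== VERDICT (by name: the statement is the Claim_ definition above) =====
theorem parse_number_parts_py_spec : Claim_equal_parse_number_parts_py := by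
  intro nt _
  unfold Spec_parse_number_parts_py parse_number_parts_py parse_number_parts_py_alt
  rw [or_empty, split_bridge, Aloop_eq]
  have hglue : nt.toList ++ ['.'] = glue (mySplit [] nt.toList) := by
    rw [mySplit_glue nt.toList []]; simp
  rw [hglue, scan_glue _ [] (mySplit_dotfree nt.toList [] (by simp))]
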